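-- pv_equiv track=rewrite | github.com/DSU-DefSec/ScoringEngine | scoring/load_config.py | get_portion
-- ===== SOURCE A (Python) =====
-- def get_portion(contents, section):
--     portion = []
--     for i in range(len(contents)):
--         if contents[i].startswith(section):
--             for j in range(i+1, len(contents)):
--                 if contents[j].startswith('['):
--                     break
--                 portion.append(contents[j])
--             break
--     return portion
-- ===== SOURCE B (Python) =====
-- def get_portion(contents, section):
--     portion = []
--     started = False
--     for line in contents:
--         if started:
--             if line.startswith('['):
--                 break
--             portion.append(line)
--         elif line.startswith(section):
--             started = True
--     return portion
-- ===== Notes on version B (the rewrite author's own statement) =====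
-- stated objective: simpler
-- what changed: Replaces the index-based find-then-inner-scan (nested loops with breaks) by one flag-driven linear pass over the lines.
import Mathlib
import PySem

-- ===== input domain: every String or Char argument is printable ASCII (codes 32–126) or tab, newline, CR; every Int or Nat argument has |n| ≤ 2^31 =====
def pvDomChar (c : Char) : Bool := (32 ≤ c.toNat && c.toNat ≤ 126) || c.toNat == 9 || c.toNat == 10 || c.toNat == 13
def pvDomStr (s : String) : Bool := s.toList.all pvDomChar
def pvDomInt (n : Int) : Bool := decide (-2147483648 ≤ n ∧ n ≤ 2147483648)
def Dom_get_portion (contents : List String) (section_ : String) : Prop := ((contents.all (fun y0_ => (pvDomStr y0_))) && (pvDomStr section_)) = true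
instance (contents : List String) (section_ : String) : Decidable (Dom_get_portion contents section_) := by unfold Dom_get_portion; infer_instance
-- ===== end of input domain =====

-- B replaces A's nested index loops (find the section line, then an inner scan) by one
-- flag-driven linear pass; same return value, no speed claim.

-- ===== PORT A =====
-- inner loop: for j in range(i+1, len(contents)): if contents[j].startswith('['): break; portion.append(contents[j])
def get_portion_innerA (contents : List String) (j : Nat) (portion : List String) : List String :=
  if h : j < contents.length then
    if PySem.Str.startswith contents[j] "[" then portion
    else get_portion_innerA contents (j + 1) (portion ++ [contents[j]])
  else portion
termination_by contents.length - j

-- outer loop: for i in range(len(contents)): if contents[i].startswith(section): <inner>; break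
def get_portion_outerA (contents : List String) (section_ : String) (i : Nat) : List String :=
  if h : i < contents.length then
    if PySem.Str.startswith contents[i] section_ then get_portion_innerA contents (i + 1) []
    else get_portion_outerA contents section_ (i + 1)
  else []
termination_by contents.length - i

def get_portion (contents : List String) (section_ : String) : List String :=
  get_portion_outerA contents section_ 0

-- ===== PORT B =====
-- single pass with a `started` flag; break → stop recursing, append → cons
def get_portion_altLoop (lines : List String) (section_ : String) (started : Bool) : List String :=
  match lines with
  | [] => []
  | line :: rest =>
    if started then
      if PySem.Str.startswith line "[" then []
      else line :: get_portion_altLoop rest section_ true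
    else if PySem.Str.startswith line section_ then get_portion_altLoop rest section_ true
    else get_portion_altLoop rest section_ false

def get_portion_alt (contents : List String) (section_ : String) : List String :=
  get_portion_altLoop contents section_ false

-- ===== PRECONDITION & SPEC =====
def Spec_get_portion (contents : List String) (section_ : String) (out : List String) : Prop := out = get_portion_alt contents section_
instance (contents : List String) (section_ : String) (out : List String) : Decidable (Spec_get_portion contents section_ out) := by unfold Spec_get_portion; infer_instance

-- ===== CLAIM (what is proved, stated in full; the proofs are below) =====
def Claim_equal_get_portion : Prop := ∀ (contents : List String) (section_ : String), Dom_get_portion contents section_ → Spec_get_portion contents section_ (get_portion contents section_)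

-- ===== LEMMAS AND PROOFS =====

-- A's inner scan from index j equals B's started-phase over the suffix, prepended with the accumulator
theorem innerA_eq (contents : List String) (section_ : String) :
    ∀ j portion, get_portion_innerA contents j portion =
      portion ++ get_portion_altLoop (contents.drop j) section_ true := by
  intro j
  induction hn : contents.length - j using Nat.strong_induction_on generalizing j with
  | _ n ih =>
    intro portion
    unfold get_portion_innerA
    by_cases h : j < contents.length
    · rw [List.drop_eq_getElem_cons h]
      simp only [h, dif_pos, get_portion_altLoop, PySem.Str.startswith]
      split_ifs with hb
      · simp
      · rw [ih (contents.length - (j+1)) (by omega) (j+1) rfl]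
        simp
    · rw [List.drop_eq_nil_of_le (by omega)]
      simp [h, get_portion_altLoop]

-- A's outer search from index i equals B's not-started phase over the suffix
theorem outerA_eq (contents : List String) (section_ : String) :
    ∀ i, get_portion_outerA contents section_ i =
      get_portion_altLoop (contents.drop i) section_ false := by
  intro i
  induction hn : contents.length - i using Nat.strong_induction_on generalizing i with
  | _ n ih =>
    unfold get_portion_outerA
    by_cases h : i < contents.length
    · rw [List.drop_eq_getElem_cons h]
      simp only [h, dif_pos, get_portion_altLoop, PySem.Str.startswith, Bool.false_eq_true,
        if_false]
      split_ifs with hs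
      · rw [innerA_eq contents section_ (i+1) []]
        simp
      · exact ih (contents.length - (i+1)) (by omega) (i+1) rfl
    · rw [List.drop_eq_nil_of_le (by omega)]
      simp [h, get_portion_altLoop]

-- ===== VERDICT (by name: the statement is the Claim_ definition above) =====
theorem get_portion_spec : Claim_equal_get_portion := by
  intro contents section_ _
  unfold Spec_get_portion get_portion get_portion_alt
  simpa using outerA_eq contents section_ 0
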